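-- pv_equiv track=rewrite | github.com/luminolous/CSM0124 | Discrete_Math/Dis-Math_Pra-FP/streamel.py | check_second
-- ===== SOURCE A (Python) =====
-- def check_second(dist):
--     moms = []
--     for i in dist:
--         for j in range(len(dist[i])):
--             if i != '-':
--                 if dist[i][j]!= '-':
--                     moms.append(dist[i][j])
--
--     null = 0
--     for i in dist:
--         if i == '-':
--             null += 1
--
--     mom = [i for i in set(moms)]
--
--     counts = []
--     for i in mom:
--         count = []
--         for j in dist:
--             for k in range(len(dist[j])):
--                 if j != '-':
--                     if dist[j][k] == i:
--                         count.append('1')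
--         if len(count) == len(dist) - null:
--             counts.append('1')
--
--     if len(counts) >= 1:
--         return 'Benar'
--     else:
--         return 'Salah'
-- ===== SOURCE B (Python) =====
-- def check_second(dist):
--     counts = {}
--     dashes = 0
--     for key, row in dist.items():
--         if key == '-':
--             dashes += 1
--         else:
--             for v in row:
--                 if v != '-':
--                     counts[v] = counts.get(v, 0) + 1
--     return 'Benar' if len(dist) - dashes in counts.values() else 'Salah'
-- ===== Notes on version B (the rewrite author's own statement) =====
-- stated objective: faster
-- what changed: A rescans the entire grid once per distinct value (building a list of '1' marks each time) after first collecting all values; B makes a single pass over the dict, tallying non-dash cells of non-dash rows into a dict of counts while counting dash keys, and then just checks whether the threshold is among the counts.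
import Mathlib
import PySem

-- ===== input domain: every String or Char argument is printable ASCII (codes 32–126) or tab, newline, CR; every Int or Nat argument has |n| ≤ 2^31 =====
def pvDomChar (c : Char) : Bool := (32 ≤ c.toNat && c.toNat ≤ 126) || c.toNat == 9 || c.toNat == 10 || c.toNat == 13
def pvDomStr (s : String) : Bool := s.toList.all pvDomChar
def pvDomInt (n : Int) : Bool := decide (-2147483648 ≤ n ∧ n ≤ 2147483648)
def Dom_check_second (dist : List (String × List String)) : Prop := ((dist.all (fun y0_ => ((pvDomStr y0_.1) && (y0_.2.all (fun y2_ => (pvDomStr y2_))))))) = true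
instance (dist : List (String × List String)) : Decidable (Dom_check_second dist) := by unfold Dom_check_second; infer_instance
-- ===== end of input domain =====

-- B replaces A's per-distinct-value rescans of the whole grid by one pass that tallies
-- non-dash cells of non-dash rows into a dict of counts (objective: faster, one pass).

-- ===== PORT A =====
-- dist is a Python dict; 'dist[i]' for i drawn from the keys is ported as 'getD … []',
-- whose default is unreachable because i is always a present key.
def check_second (dist : List (String × List String)) : String :=
  let d := PySem.Dict.mk dist
  let moms := d.keys.foldl (fun moms i =>
    (PySem.List.pyRange 0 (PySem.List.len (d.getD i [])) 1).foldl (fun moms j =>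
      if i ≠ "-" then
        if PySem.List.pyGetD (d.getD i []) j "" ≠ "-" then
          moms ++ [PySem.List.pyGetD (d.getD i []) j ""]
        else moms
      else moms) moms) ([] : List String)
  let null : Int := d.keys.foldl (fun null i => if i = "-" then null + 1 else null) 0
  let mom : List String := PySem.Set.ofList moms
  let counts := mom.foldl (fun counts i =>
    let count := d.keys.foldl (fun count j =>
      (PySem.List.pyRange 0 (PySem.List.len (d.getD j [])) 1).foldl (fun count k =>
        if j ≠ "-" then
          if PySem.List.pyGetD (d.getD j []) k "" = i then count ++ ["1"] else count
        else count) count) ([] : List String)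
    if (count.length : Int) = (d.size : Int) - null then counts ++ ["1"] else counts) ([] : List String)
  if (counts.length : Int) ≥ 1 then "Benar" else "Salah"

-- ===== PORT B =====
def check_second_alt (dist : List (String × List String)) : String :=
  let st := dist.foldl
    (fun (acc : PySem.Dict String Int × Int) kv =>
      if kv.1 = "-" then (acc.1, acc.2 + 1)
      else (kv.2.foldl (fun cnts v => if v ≠ "-" then cnts.insert v (cnts.getD v 0 + 1) else cnts) acc.1,
            acc.2))
    (PySem.Dict.empty, (0 : Int))
  if ((dist.length : Int) - st.2) ∈ st.1.values then "Benar" else "Salah"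

-- ===== PRECONDITION & SPEC =====
-- Pre_ excludes association lists with duplicate keys: A's argument is a Python dict, whose
-- keys are necessarily distinct, so no Python input corresponds to such a list.
def Pre_check_second (dist : List (String × List String)) : Prop := (dist.map Prod.fst).Nodup
instance (dist : List (String × List String)) : Decidable (Pre_check_second dist) := by unfold Pre_check_second; infer_instance
def pvWitness_check_second : (List (String × List String)) := [("a", ["x", "-"]), ("-", ["x"]), ("b", ["x"])]

def Spec_check_second (dist : List (String × List String)) (out : String) : Prop := out = check_second_alt dist
instance (dist : List (String × List String)) (out : String) : Decidable (Spec_check_second dist out) := by unfold Spec_check_second; infer_instance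

-- ===== CLAIM (what is proved, stated in full; the proofs are below) =====
def Claim_equal_check_second : Prop := ∀ (dist : List (String × List String)), Dom_check_second dist → Pre_check_second dist → Spec_check_second dist (check_second dist)

-- ===== LEMMAS AND PROOFS =====

def pvCells (dist : List (String × List String)) : List String :=
  (dist.filter (fun kv => kv.1 ≠ "-")).flatMap (fun kv => kv.2)
def pvVals (dist : List (String × List String)) : List String :=
  (pvCells dist).filter (fun v => v ≠ "-")

theorem pv_idx_fold (row : List String) (acc : List String) (p : String → Prop) [DecidablePred p] (g : String → String) :
    (PySem.List.pyRange 0 (PySem.List.len row) 1).foldl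
      (fun acc j => if p (PySem.List.pyGetD row j "") then acc ++ [g (PySem.List.pyGetD row j "")] else acc) acc
    = acc ++ (row.filter (fun v => decide (p v))).map g := by
  rw [← List.foldl_map (f := fun j => PySem.List.pyGetD row j "")
        (g := fun acc v => if p v then acc ++ [g v] else acc),
      PySem.List.map_pyGetD_pyRange_zero row "",
      PySem.List.foldl_append_ite]

theorem pv_getD_mk (dist : List (String × List String)) (h : (dist.map Prod.fst).Nodup)
    (kv : String × List String) (hm : kv ∈ dist) :
    (PySem.Dict.mk dist).getD kv.1 [] = kv.2 := by
  apply PySem.Dict.getD_of_mem_items (d := PySem.Dict.mk dist) (k := kv.1) (v := kv.2)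
  · exact hm
  · rw [PySem.Dict.keys_mk]; exact h

theorem pv_fold_vals (dist : List (String × List String)) (acc : List String) :
    dist.foldl (fun moms kv => if kv.1 ≠ "-" then moms ++ kv.2.filter (fun v => decide (v ≠ "-")) else moms) acc
    = acc ++ pvVals dist := by
  induction dist generalizing acc with
  | nil => simp [pvVals, pvCells]
  | cons kv t ih =>
    rw [List.foldl_cons, ih]
    by_cases hk : kv.1 = "-" <;>
      simp [hk, pvVals, pvCells, List.filter_flatMap]

theorem pv_moms (dist : List (String × List String)) (h : (dist.map Prod.fst).Nodup) :
    (PySem.Dict.mk dist).keys.foldl (fun moms i =>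
      (PySem.List.pyRange 0 (PySem.List.len ((PySem.Dict.mk dist).getD i [])) 1).foldl (fun moms j =>
        if i ≠ "-" then
          if PySem.List.pyGetD ((PySem.Dict.mk dist).getD i []) j "" ≠ "-" then
            moms ++ [PySem.List.pyGetD ((PySem.Dict.mk dist).getD i []) j ""]
          else moms
        else moms) moms) ([] : List String) = pvVals dist := by
  rw [PySem.Dict.keys_mk, List.foldl_map,
      PySem.List.foldl_congr_mem _ _
        (fun moms kv => if kv.1 ≠ "-" then moms ++ kv.2.filter (fun v => decide (v ≠ "-")) else moms) _
        (by
          intro acc kv hm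
          rw [pv_getD_mk dist h kv hm]
          by_cases hk : kv.1 = "-"
          · simp [hk]
          · simp only [hk, ne_eq, not_false_iff, if_true]
            have := pv_idx_fold kv.2 acc (fun v => v ≠ "-") (fun v => v)
            simpa using this),
      pv_fold_vals, List.nil_append]


theorem pv_fold_count (i : String) (dist : List (String × List String)) (acc : List String) :
    dist.foldl (fun cnt kv =>
      if kv.1 ≠ "-" then cnt ++ (kv.2.filter (fun v => decide (v = i))).map (fun _ => "1") else cnt) acc
    = acc ++ ((pvCells dist).filter (fun v => decide (v = i))).map (fun _ => "1") := by
  induction dist generalizing acc with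
  | nil => simp [pvCells]
  | cons kv t ih =>
    rw [List.foldl_cons, ih]
    by_cases hk : kv.1 = "-" <;>
      simp [hk, pvCells, List.filter_flatMap]

theorem pv_count (dist : List (String × List String)) (h : (dist.map Prod.fst).Nodup) (i : String) :
    (PySem.Dict.mk dist).keys.foldl (fun count j =>
      (PySem.List.pyRange 0 (PySem.List.len ((PySem.Dict.mk dist).getD j [])) 1).foldl (fun count k =>
        if j ≠ "-" then
          if PySem.List.pyGetD ((PySem.Dict.mk dist).getD j []) k "" = i then count ++ ["1"] else count
        else count) count) ([] : List String)
    = ((pvCells dist).filter (fun v => decide (v = i))).map (fun _ => "1") := by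
  rw [PySem.Dict.keys_mk, List.foldl_map,
      PySem.List.foldl_congr_mem _ _
        (fun cnt kv => if kv.1 ≠ "-" then cnt ++ (kv.2.filter (fun v => decide (v = i))).map (fun _ => "1") else cnt) _
        (by
          intro acc kv hm
          rw [pv_getD_mk dist h kv hm]
          by_cases hk : kv.1 = "-"
          · simp [hk]
          · simp only [hk, ne_eq, not_false_iff, if_true]
            have := pv_idx_fold kv.2 acc (fun v => v = i) (fun _ => "1")
            simpa using this),
      pv_fold_count, List.nil_append]

theorem pv_inner_filter (row : List String) (d0 : PySem.Dict String Int) :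
    row.foldl (fun cnts v => if v ≠ "-" then cnts.insert v (cnts.getD v 0 + 1) else cnts) d0
    = (row.filter (fun v => decide (v ≠ "-"))).foldl (fun cnts v => cnts.insert v (cnts.getD v 0 + 1)) d0 := by
  induction row generalizing d0 with
  | nil => rfl
  | cons v t ih =>
    rw [List.foldl_cons, List.filter_cons]
    by_cases hv : v = "-"
    · rw [if_neg (by simp [hv]), if_neg (by simp [hv]), ih]
    · rw [if_pos hv, if_pos (by simp [hv]), List.foldl_cons, ih]

theorem pv_bfold (dist : List (String × List String)) (d0 : PySem.Dict String Int) (n0 : Int) :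
    dist.foldl
      (fun (acc : PySem.Dict String Int × Int) kv =>
        if kv.1 = "-" then (acc.1, acc.2 + 1)
        else (kv.2.foldl (fun cnts v => if v ≠ "-" then cnts.insert v (cnts.getD v 0 + 1) else cnts) acc.1,
              acc.2))
      (d0, n0)
    = ((pvVals dist).foldl (fun cnts v => cnts.insert v (cnts.getD v 0 + 1)) d0,
       n0 + (dist.countP (fun kv => decide (kv.1 = "-")) : Int)) := by
  induction dist generalizing d0 n0 with
  | nil => simp [pvVals, pvCells]
  | cons kv t ih =>
    rw [List.foldl_cons]
    by_cases hk : kv.1 = "-"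
    · simp only [hk, if_true]
      rw [ih]
      simp [pvVals, pvCells, hk]
      ring
    · simp only [hk, if_false]
      rw [ih]
      rw [pv_inner_filter kv.2 d0]
      have hvals : pvVals (kv :: t) = kv.2.filter (fun v => decide (v ≠ "-")) ++ pvVals t := by
        simp [pvVals, pvCells, hk, List.filter_flatMap]
      rw [hvals, List.foldl_append]
      simp [hk]

theorem pv_null (dist : List (String × List String)) :
    (PySem.Dict.mk dist).keys.foldl (fun null i => if i = "-" then null + 1 else null) (0 : Int)
    = (dist.countP (fun kv => decide (kv.1 = "-")) : Int) := by
  rw [PySem.Dict.keys_mk, List.foldl_map,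
      PySem.List.foldl_ite_add_one (p := fun kv : String × List String => kv.1 = "-")]
  simp

theorem pv_values (vals : List String) :
    (vals.foldl (fun cnts v => cnts.insert v (cnts.getD v 0 + 1)) (PySem.Dict.empty : PySem.Dict String Int)).values
    = (PySem.Set.ofList vals).map (fun k => ((vals.count k : Nat) : Int)) := by
  have hnd : (vals.foldl (fun cnts v => cnts.insert v (cnts.getD v 0 + 1)) (PySem.Dict.empty : PySem.Dict String Int)).keys.Nodup := by
    apply PySem.Dict.nodup_keys_foldl_insert (f := fun cnts v => cnts.getD v 0 + 1)
    simp [PySem.Dict.keys_empty]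
  have hitems := PySem.Dict.items_eq_map_keys _ hnd (0 : Int)
  have hkeys : (vals.foldl (fun cnts v => cnts.insert v (cnts.getD v 0 + 1)) (PySem.Dict.empty : PySem.Dict String Int)).keys
      = PySem.Set.ofList vals := by
    rw [PySem.Dict.keys_foldl_insert (f := fun cnts v => cnts.getD v 0 + 1), PySem.Dict.keys_empty,
        PySem.Set.update_nil_left]
  show (vals.foldl (fun cnts v => cnts.insert v (cnts.getD v 0 + 1)) (PySem.Dict.empty : PySem.Dict String Int)).items.map (·.2) = _
  rw [hitems, hkeys, List.map_map]
  apply List.map_congr_left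
  intro k _
  simp [PySem.Dict.getD_foldl_insert_add_one, PySem.Dict.getD_empty]

theorem pv_count_bridge (dist : List (String × List String)) (i : String) (hi : i ≠ "-") :
    ((pvVals dist).count i : Int) = ((pvCells dist).countP (fun v => decide (v = i)) : Int) := by
  unfold pvVals
  rw [List.count_filter (by simpa using hi)]
  rw [List.count, List.countP_congr (q := fun v => decide (v = i)) (by intro x _; simp)]

theorem pv_ones_fold (P : String → Prop) [DecidablePred P] (l : List String) (acc : List String) :
    l.foldl (fun counts i => if P i then counts ++ ["1"] else counts) acc
    = acc ++ (l.filter (fun i => decide (P i))).map (fun _ => "1") := by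
  induction l generalizing acc with
  | nil => simp
  | cons i t ih =>
    rw [List.foldl_cons, List.filter_cons]
    by_cases hi : P i
    · rw [if_pos hi, if_pos (by simpa using hi), List.map_cons, ih]
      simp
    · rw [if_neg hi, if_neg (by simpa using hi), ih]

theorem pv_final (dist : List (String × List String)) (hpre : (dist.map Prod.fst).Nodup) :
    check_second dist = check_second_alt dist := by
  unfold check_second check_second_alt
  simp only [pv_moms dist hpre, pv_bfold, pv_null dist, pv_count dist hpre, pv_values,
    PySem.Dict.size, List.length_map, pv_ones_fold, List.nil_append, zero_add,
    ← List.countP_eq_length_filter]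
  apply if_congr ?_ rfl rfl
  rw [ge_iff_le, show ∀ n : Nat, ((1:Int) ≤ (n:Int) ↔ 0 < n) from fun n => by exact_mod_cast Nat.lt_iff_add_one_le.symm,
      List.countP_pos_iff, List.mem_map]
  constructor
  · rintro ⟨i, hiS, hip⟩
    refine ⟨i, hiS, ?_⟩
    have hi : i ≠ "-" := by
      have := (PySem.Set.mem_ofList _ _).mp hiS
      simp only [pvVals, List.mem_filter] at this
      simpa using this.2
    rw [pv_count_bridge dist i hi]
    simpa using hip
  · rintro ⟨i, hiS, hip⟩
    refine ⟨i, hiS, ?_⟩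
    have hi : i ≠ "-" := by
      have := (PySem.Set.mem_ofList _ _).mp hiS
      simp only [pvVals, List.mem_filter] at this
      simpa using this.2
    simp only [decide_eq_true_eq, ← pv_count_bridge dist i hi]
    exact hip

-- ===== VERDICT (by name: the statement is the Claim_ definition above) =====
theorem check_second_spec : Claim_equal_check_second := by
  intro dist _hdom hpre
  unfold Spec_check_second
  exact pv_final dist hpre
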